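-- pv_equiv track=rewrite | github.com/GundalaNikhil/DSA | dsa-problems/Bitwise/testcases/generate_all_16_complete.py | sol_003
-- ===== SOURCE A (Python) =====
-- def sol_003(L, R, m):
--     """BIT-003: Bitwise AND Skipping Multiples"""
--     if R - L <= 2000000:
--         ans = -1
--         found = False
--         for i in range(L, R + 1):
--             if i % m != 0:
--                 if not found:
--                     ans = i
--                     found = True
--                 else:
--                     ans &= i
--         return ans if found else -1
--
--     l_temp, r_temp = L, R
--     shift = 0
--     while l_temp != r_temp:
--         l_temp >>= 1
--         r_temp >>= 1
--         shift += 1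
--     standard_and = l_temp << shift
--
--     if m == 2:
--         standard_and |= 1
--     return standard_and
-- ===== SOURCE B (Python) =====
-- # Same result as A, by a different decomposition:
-- #  - short ranges: recursive divide-and-conquer AND over the non-multiples of m
-- #    (an Option-style combine instead of A's ans/found flag loop);
-- #  - long ranges: the common-prefix AND obtained in closed form from
-- #    (L ^ R).bit_length() instead of A's shift-until-equal loop.
--
-- def _go(a, b, m):
--     """AND of all x in [a, b] with x % m != 0, or None if there is none."""
--     if a > b:
--         return None
--     if a == b:
--         return a if a % m != 0 else None
--     mid = (a + b) // 2
--     x = _go(a, mid, m)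
--     y = _go(mid + 1, b, m)
--     if x is None:
--         return y
--     if y is None:
--         return x
--     return x & y
--
--
-- def sol_003(L, R, m):
--     """BIT-003: Bitwise AND Skipping Multiples"""
--     if R - L <= 2000000:
--         v = _go(L, R, m)
--         return v if v is not None else -1
--     h = (L ^ R).bit_length()
--     ans = (L >> h) << h
--     if m == 2:
--         ans |= 1
--     return ans
-- ===== Notes on version B (the rewrite author's own statement) =====
-- stated objective: alternative
-- what changed: The short-range scan with an ans/found flag becomes a recursive divide-and-conquer AND over the non-multiples (combining optional partial results), and the long-range shift-until-equal loop becomes a closed-form common-prefix AND computed from (L ^ R).bit_length().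
import Mathlib
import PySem

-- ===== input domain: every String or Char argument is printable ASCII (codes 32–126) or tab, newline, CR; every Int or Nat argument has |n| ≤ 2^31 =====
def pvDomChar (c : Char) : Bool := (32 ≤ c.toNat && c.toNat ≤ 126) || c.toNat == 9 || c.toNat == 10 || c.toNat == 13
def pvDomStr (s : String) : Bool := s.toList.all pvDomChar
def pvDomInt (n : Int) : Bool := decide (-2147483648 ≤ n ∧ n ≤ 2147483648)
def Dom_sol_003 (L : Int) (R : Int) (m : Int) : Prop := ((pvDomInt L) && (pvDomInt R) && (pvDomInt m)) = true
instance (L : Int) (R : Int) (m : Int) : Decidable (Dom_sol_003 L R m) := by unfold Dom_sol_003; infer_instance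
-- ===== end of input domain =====

-- B keeps A's two branches but replaces both algorithms: a divide-and-conquer AND instead of the
-- flag loop (short ranges) and a closed-form common-prefix AND from bit_length instead of the
-- shift-until-equal loop (long ranges); equal return values on all of Pre_.

-- ===== PORT A =====
def pvStepA (m : Int) (st : Int × Bool) (i : Int) : Int × Bool :=
  if PySem.Int.mod i m ≠ 0 then
    (if st.2 = false then (i, true) else (PySem.Int.band st.1 i, st.2))
  else st

def pvShiftA : Nat → Int → Int → Nat → Int × Nat
  | 0, l, _, s => (l, s)
  | fuel+1, l, r, s => if l ≠ r then pvShiftA fuel (l >>> (1 : Nat)) (r >>> (1 : Nat)) (s+1) else (l, s)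

def sol_003 (L : Int) (R : Int) (m : Int) : Int :=
  if R - L ≤ 2000000 then
    let st := (PySem.List.pyRange L (R + 1) 1).foldl (pvStepA m) (-1, false)
    if st.2 = true then st.1 else -1
  else
    let p := pvShiftA 128 L R 0
    let sa := p.1 <<< p.2
    if m = 2 then PySem.Int.bor sa 1 else sa

-- ===== PORT B =====
def pvGo (m a b : Int) : Option Int :=
  if a > b then none
  else if _heq : a = b then (if PySem.Int.mod a m ≠ 0 then some a else none)
  else
    match pvGo m a (PySem.Int.floordiv (a + b) 2),
          pvGo m (PySem.Int.floordiv (a + b) 2 + 1) b with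
    | none, y => y
    | some x, none => some x
    | some x, some y => some (PySem.Int.band x y)
termination_by (b - a).toNat
decreasing_by
  · have h1 : a ≤ PySem.Int.floordiv (a + b) 2 :=
      (PySem.Int.le_floordiv_iff_mul_le (by omega)).2 (by omega)
    have h2 : PySem.Int.floordiv (a + b) 2 < b :=
      (PySem.Int.floordiv_lt_iff_lt_mul (by omega)).2 (by omega)
    omega
  · have h1 : a ≤ PySem.Int.floordiv (a + b) 2 :=
      (PySem.Int.le_floordiv_iff_mul_le (by omega)).2 (by omega)
    have h2 : PySem.Int.floordiv (a + b) 2 < b :=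
      (PySem.Int.floordiv_lt_iff_lt_mul (by omega)).2 (by omega)
    omega

def sol_003_alt (L : Int) (R : Int) (m : Int) : Int :=
  if R - L ≤ 2000000 then
    match pvGo m L R with
    | some v => v
    | none => -1
  else
    let h := PySem.Int.bitLength (PySem.Int.bxor L R)
    let ans := (L >>> h) <<< h
    if m = 2 then PySem.Int.bor ans 1 else ans

-- ===== PRECONDITION & SPEC =====
-- Pre_ excludes exactly the inputs where the Python A does not return: m = 0 with a nonempty
-- short range (ZeroDivisionError in `i % m`), and a long range straddling 0 (the shift loop
-- sends l to -1 and r to 0, so `while l_temp != r_temp` never terminates).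
def Pre_sol_003 (L : Int) (R : Int) (m : Int) : Prop :=
  (R - L ≤ 2000000 → m ≠ 0 ∨ R < L) ∧ (2000000 < R - L → 0 ≤ L ∨ R < 0)
instance (L : Int) (R : Int) (m : Int) : Decidable (Pre_sol_003 L R m) := by
  unfold Pre_sol_003; infer_instance

def pvWitness_sol_003 : Int × Int × Int := (0, 10, 3)

def Spec_sol_003 (L : Int) (R : Int) (m : Int) (out : Int) : Prop := out = sol_003_alt L R m
instance (L : Int) (R : Int) (m : Int) (out : Int) : Decidable (Spec_sol_003 L R m out) := by
  unfold Spec_sol_003; infer_instance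

-- ===== CLAIM (what is proved, stated in full; the proofs are below) =====
def Claim_equal_sol_003 : Prop := ∀ (L : Int) (R : Int) (m : Int), Dom_sol_003 L R m → Pre_sol_003 L R m → Spec_sol_003 L R m (sol_003 L R m)

-- ===== LEMMAS AND PROOFS =====

-- ---- Nat bit facts ----
theorem pv_disj_or_eq_add (a : Nat) : ∀ b : Nat, a &&& b = 0 → a ||| b = a + b := by
  induction a using Nat.binaryRec with
  | zero => intro b _; simp
  | bit c a' IH =>
    intro b hb
    rw [← Nat.bit_testBit_zero_shiftRight_one b] at hb ⊢
    rw [Nat.land_bit] at hb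
    rw [Nat.lor_bit]
    rcases Nat.bit_eq_zero_iff.mp hb with ⟨h1, h2⟩
    have h3 := IH _ h1
    simp only [Nat.bit_val] at *
    cases c <;> cases hc : b.testBit 0 <;> simp_all <;> omega

theorem pv_sub_and_eq_ldiff (m n : Nat) : m - (m &&& n) = Nat.ldiff m n := by
  have h1 : (Nat.ldiff m n) ||| (m &&& n) = m := by
    apply Nat.eq_of_testBit_eq; intro k
    simp only [Nat.testBit_or, Nat.testBit_ldiff, Nat.testBit_and]
    cases m.testBit k <;> cases n.testBit k <;> rfl
  have h2 : (Nat.ldiff m n) &&& (m &&& n) = 0 := by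
    apply Nat.eq_of_testBit_eq; intro k
    simp only [Nat.testBit_and, Nat.testBit_ldiff, Nat.zero_testBit]
    cases m.testBit k <;> cases n.testBit k <;> rfl
  have h3 := pv_disj_or_eq_add _ _ h2
  have h4 : m &&& n ≤ m := Nat.and_le_left
  omega

-- ---- bridges from PySem's Python-exact bitwise ops to Mathlib's Int.land / Int.xor ----
theorem pv_band_eq_land (a b : Int) : PySem.Int.band a b = Int.land a b := by
  cases a with
  | ofNat ma =>
    cases b with
    | ofNat nb => simp [PySem.Int.band, Int.land, Int.natCast_nonneg]
    | negSucc nb =>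
      have h1 : ¬ (0 : Int) ≤ Int.negSucc nb := by rw [Int.negSucc_eq]; omega
      have h2 : (-(Int.negSucc nb) - 1).toNat = nb := by rw [Int.negSucc_eq]; omega
      simp [PySem.Int.band, Int.land, Int.natCast_nonneg, h1, pv_sub_and_eq_ldiff]
  | negSucc ma =>
    have h1 : ¬ (0 : Int) ≤ Int.negSucc ma := by rw [Int.negSucc_eq]; omega
    have h2 : (-(Int.negSucc ma) - 1).toNat = ma := by rw [Int.negSucc_eq]; omega
    cases b with
    | ofNat nb => simp [PySem.Int.band, Int.land, Int.natCast_nonneg, h1, pv_sub_and_eq_ldiff]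
    | negSucc nb =>
      have h3 : ¬ (0 : Int) ≤ Int.negSucc nb := by rw [Int.negSucc_eq]; omega
      have h4 : (-(Int.negSucc nb) - 1).toNat = nb := by rw [Int.negSucc_eq]; omega
      simp [PySem.Int.band, Int.land, h1, h2, h3, h4, Int.negSucc_eq]; omega

theorem pv_bxor_eq_xor (a b : Int) : PySem.Int.bxor a b = Int.xor a b := by
  cases a with
  | ofNat ma =>
    cases b with
    | ofNat nb => simp [PySem.Int.bxor, Int.xor, Int.natCast_nonneg]
    | negSucc nb =>
      have h1 : ¬ (0 : Int) ≤ Int.negSucc nb := by rw [Int.negSucc_eq]; omega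
      have h2 : (-(Int.negSucc nb) - 1).toNat = nb := by rw [Int.negSucc_eq]; omega
      simp [PySem.Int.bxor, Int.xor, Int.natCast_nonneg, h1, h2, Int.negSucc_eq]; omega
  | negSucc ma =>
    have h1 : ¬ (0 : Int) ≤ Int.negSucc ma := by rw [Int.negSucc_eq]; omega
    have h2 : (-(Int.negSucc ma) - 1).toNat = ma := by rw [Int.negSucc_eq]; omega
    cases b with
    | ofNat nb => simp [PySem.Int.bxor, Int.xor, Int.natCast_nonneg, h1, h2, Int.negSucc_eq]; omega
    | negSucc nb =>
      have h3 : ¬ (0 : Int) ≤ Int.negSucc nb := by rw [Int.negSucc_eq]; omega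
      have h4 : (-(Int.negSucc nb) - 1).toNat = nb := by rw [Int.negSucc_eq]; omega
      simp [PySem.Int.bxor, Int.xor, h1, h2, h3, h4]

theorem pv_int_ext {a b : Int} (h : ∀ k, a.testBit k = b.testBit k) : a = b := by
  cases a with
  | ofNat ma =>
    cases b with
    | ofNat nb =>
      have : ma = nb := Nat.eq_of_testBit_eq fun k => by simpa [Int.testBit] using h k
      simp [this]
    | negSucc nb =>
      exfalso
      have hk := h (ma + nb + 1)
      have hma : ma.testBit (ma + nb + 1) = false :=
        Nat.testBit_lt_two_pow (lt_of_lt_of_le Nat.lt_two_pow_self (Nat.pow_le_pow_right (by omega) (by omega)))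
      have hnb : nb.testBit (ma + nb + 1) = false :=
        Nat.testBit_lt_two_pow (lt_of_lt_of_le Nat.lt_two_pow_self (Nat.pow_le_pow_right (by omega) (by omega)))
      simp [Int.testBit, hma, hnb] at hk
  | negSucc ma =>
    cases b with
    | ofNat nb =>
      exfalso
      have hk := h (ma + nb + 1)
      have hma : ma.testBit (ma + nb + 1) = false :=
        Nat.testBit_lt_two_pow (lt_of_lt_of_le Nat.lt_two_pow_self (Nat.pow_le_pow_right (by omega) (by omega)))
      have hnb : nb.testBit (ma + nb + 1) = false :=
        Nat.testBit_lt_two_pow (lt_of_lt_of_le Nat.lt_two_pow_self (Nat.pow_le_pow_right (by omega) (by omega)))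
      simp [Int.testBit, hma, hnb] at hk
    | negSucc nb =>
      have : ma = nb := Nat.eq_of_testBit_eq fun k => by
        have := h k; simpa [Int.testBit] using this
      simp [this]

theorem pv_band_assoc (a b c : Int) : PySem.Int.band (PySem.Int.band a b) c = PySem.Int.band a (PySem.Int.band b c) := by
  simp only [pv_band_eq_land]
  apply pv_int_ext; intro k
  simp [Int.testBit_land, Bool.and_assoc]

theorem pv_xor_eq_zero {a b : Int} (h : Int.xor a b = 0) : a = b := by
  cases a <;> cases b <;> simp_all [Int.xor, Int.natBitwise, Int.bitwise] <;>
    first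
      | (apply Nat.eq_of_testBit_eq; intro k; have := congrArg (fun t => Nat.testBit t k) h; simp_all)
      | omega

-- ---- shift facts ----
theorem pv_bit_shiftRight_one (b : Bool) (n : Int) : (Int.bit b n) >>> (1 : Nat) = n := by
  rw [Int.bit_val, Int.shiftRight_eq_div_pow]
  cases b <;> simp <;> omega

theorem pv_xor_shiftRight_one (x y : Int) : (Int.xor x y) >>> (1 : Nat) = Int.xor (x >>> (1 : Nat)) (y >>> (1 : Nat)) := by
  conv_lhs => rw [← Int.bit_decomp x, ← Int.bit_decomp y]
  rw [Int.lxor_bit, pv_bit_shiftRight_one]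
  conv_rhs => rw [← Int.bit_decomp x, ← Int.bit_decomp y]
  rw [pv_bit_shiftRight_one, pv_bit_shiftRight_one]

theorem pv_xor_shiftRight (x y : Int) : ∀ n : Nat, (Int.xor x y) >>> n = Int.xor (x >>> n) (y >>> n) := by
  intro n
  induction n generalizing x y with
  | zero => simp [Int.shiftRight_zero]
  | succ k IH =>
    have h1 : ∀ z : Int, z >>> (k + 1) = (z >>> (1 : Nat)) >>> k := by
      intro z; rw [← Int.shiftRight_add]; norm_num [Nat.add_comm]
    rw [h1, h1 x, h1 y, pv_xor_shiftRight_one, IH]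

theorem pv_xor_self (a : Int) : Int.xor a a = 0 := by
  have h := pv_bxor_eq_xor a a
  rw [PySem.Int.bxor_self] at h
  omega

theorem pv_shiftRight_eq_iff (x y : Int) (n : Nat) :
    x >>> n = y >>> n ↔ (Int.xor x y) >>> n = 0 := by
  rw [pv_xor_shiftRight]
  constructor
  · intro h; rw [h, pv_xor_self]
  · intro h; exact pv_xor_eq_zero h

theorem pv_shiftRight_eq_zero_iff {X : Int} (hX : 0 ≤ X) (n : Nat) :
    X >>> n = 0 ↔ X < 2 ^ n := by
  rw [Int.shiftRight_eq_div_pow]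
  constructor
  · intro h
    by_contra hlt
    push Not at hlt
    have h2 : (1 : Int) ≤ X / ((2 ^ n : Nat) : Int) := by
      rw [Int.le_ediv_iff_mul_le (by positivity)]
      push_cast at hlt ⊢; omega
    omega
  · intro h
    apply Int.ediv_eq_zero_of_lt hX
    push_cast; omega

-- ---- the small branch: both folds equal an optional AND over the range ----
def pvAndAcc (m v : Int) (xs : List Int) : Int :=
  xs.foldl (fun x i => if PySem.Int.mod i m = 0 then x else PySem.Int.band x i) v

def pvStepO (m : Int) (o : Option Int) (i : Int) : Option Int :=
  if PySem.Int.mod i m = 0 then o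
  else some (match o with | none => i | some x => PySem.Int.band x i)

def pvOptRes (m : Int) (xs : List Int) : Option Int := xs.foldl (pvStepO m) none

theorem pv_andAcc_cons_zero (m v i : Int) (xs : List Int) (h : PySem.Int.mod i m = 0) :
    pvAndAcc m v (i :: xs) = pvAndAcc m v xs := by
  simp [pvAndAcc, h]

theorem pv_andAcc_cons_ne (m v i : Int) (xs : List Int) (h : ¬ PySem.Int.mod i m = 0) :
    pvAndAcc m v (i :: xs) = pvAndAcc m (PySem.Int.band v i) xs := by
  simp [pvAndAcc, h]

theorem pv_foldO_some (m : Int) : ∀ (xs : List Int) (v : Int),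
    xs.foldl (pvStepO m) (some v) = some (pvAndAcc m v xs) := by
  intro xs
  induction xs with
  | nil => intro v; simp [pvAndAcc]
  | cons i xs IH =>
    intro v
    by_cases h : PySem.Int.mod i m = 0
    · rw [List.foldl_cons, show pvStepO m (some v) i = some v by simp [pvStepO, h],
        IH, pv_andAcc_cons_zero m v i xs h]
    · rw [List.foldl_cons,
        show pvStepO m (some v) i = some (PySem.Int.band v i) by simp [pvStepO, h],
        IH, pv_andAcc_cons_ne m v i xs h]

theorem pv_optRes_cons_zero (m i : Int) (xs : List Int) (h : PySem.Int.mod i m = 0) :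
    pvOptRes m (i :: xs) = pvOptRes m xs := by
  simp [pvOptRes, pvStepO, h]

theorem pv_optRes_cons_ne (m i : Int) (xs : List Int) (h : ¬ PySem.Int.mod i m = 0) :
    pvOptRes m (i :: xs) = some (pvAndAcc m i xs) := by
  have h0 : pvStepO m none i = some i := by simp [pvStepO, h]
  show (i :: xs).foldl (pvStepO m) none = _
  rw [List.foldl_cons, h0, pv_foldO_some]

theorem pv_andAcc_elim (m : Int) : ∀ (xs : List Int) (x : Int),
    pvAndAcc m x xs = (pvOptRes m xs).elim x (fun y => PySem.Int.band x y) := by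
  intro xs
  induction xs with
  | nil => intro x; simp [pvAndAcc, pvOptRes]
  | cons i xs IH =>
    intro x
    by_cases h : PySem.Int.mod i m = 0
    · rw [pv_andAcc_cons_zero m x i xs h, IH, pv_optRes_cons_zero m i xs h]
    · rw [pv_andAcc_cons_ne m x i xs h, IH, pv_optRes_cons_ne m i xs h, IH i]
      cases hr : pvOptRes m xs with
      | none => simp
      | some y => simp [pv_band_assoc]

theorem pv_stepA_zero (m : Int) (st : Int × Bool) (i : Int) (h : PySem.Int.mod i m = 0) :
    pvStepA m st i = st := by
  simp [pvStepA, h]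

theorem pv_foldA_true (m : Int) : ∀ (xs : List Int) (v : Int),
    xs.foldl (pvStepA m) (v, true) = (pvAndAcc m v xs, true) := by
  intro xs
  induction xs with
  | nil => intro v; simp [pvAndAcc]
  | cons i xs IH =>
    intro v
    by_cases h : PySem.Int.mod i m = 0
    · rw [List.foldl_cons, pv_stepA_zero m _ i h, IH, pv_andAcc_cons_zero m v i xs h]
    · rw [List.foldl_cons,
        show pvStepA m (v, true) i = (PySem.Int.band v i, true) by simp [pvStepA, h],
        IH, pv_andAcc_cons_ne m v i xs h]

theorem pv_foldA (m : Int) : ∀ xs : List Int,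
    xs.foldl (pvStepA m) (-1, false) = ((pvOptRes m xs).getD (-1), (pvOptRes m xs).isSome) := by
  intro xs
  induction xs with
  | nil => simp [pvOptRes]
  | cons i xs IH =>
    by_cases h : PySem.Int.mod i m = 0
    · rw [List.foldl_cons, pv_stepA_zero m _ i h, IH, pv_optRes_cons_zero m i xs h]
    · rw [List.foldl_cons,
        show pvStepA m (-1, false) i = (i, true) by simp [pvStepA, h],
        pv_foldA_true, pv_optRes_cons_ne m i xs h]
      simp

theorem pv_optRes_append (m : Int) (xs ys : List Int) :
    pvOptRes m (xs ++ ys) =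
      match pvOptRes m xs, pvOptRes m ys with
      | none, y => y
      | some x, none => some x
      | some x, some y => some (PySem.Int.band x y) := by
  show (xs ++ ys).foldl (pvStepO m) none = _
  rw [List.foldl_append]
  cases h1 : pvOptRes m xs with
  | none =>
    have hx : xs.foldl (pvStepO m) none = none := h1
    rw [hx]; rfl
  | some x =>
    have hx : xs.foldl (pvStepO m) none = some x := h1
    rw [hx, pv_foldO_some]
    cases h2 : pvOptRes m ys with
    | none => rw [pv_andAcc_elim, h2]; rfl
    | some y => rw [pv_andAcc_elim, h2]; rfl

theorem pv_go_eq (m : Int) : ∀ (n : Nat) (a b : Int), (b - a).toNat ≤ n →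
    pvGo m a b = pvOptRes m (PySem.List.pyRange a (b + 1) 1) := by
  intro n
  induction n with
  | zero =>
    intro a b hn
    have hab : b ≤ a := by omega
    rw [pvGo]
    by_cases h : a > b
    · rw [if_pos h, PySem.List.pyRange_one_eq_nil (by omega)]; rfl
    · have heq : a = b := by omega
      rw [if_neg h, dif_pos heq]
      subst heq
      rw [PySem.List.pyRange_one_singleton]
      by_cases hm : PySem.Int.mod a m ≠ 0 <;> simp [pvOptRes, pvStepO, hm]
  | succ n IH =>
    intro a b hn
    rw [pvGo]
    by_cases h : a > b
    · rw [if_pos h, PySem.List.pyRange_one_eq_nil (by omega)]; rfl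
    · by_cases heq : a = b
      · rw [if_neg h, dif_pos heq]
        subst heq
        rw [PySem.List.pyRange_one_singleton]
        by_cases hm : PySem.Int.mod a m ≠ 0 <;> simp [pvOptRes, pvStepO, hm]
      · rw [if_neg h, dif_neg heq]
        have hab : a < b := by omega
        set mid := PySem.Int.floordiv (a + b) 2 with hmid
        have hm1 : a ≤ mid := (PySem.Int.le_floordiv_iff_mul_le (by omega)).2 (by omega)
        have hm2 : mid < b := (PySem.Int.floordiv_lt_iff_lt_mul (by omega)).2 (by omega)
        have hi1 : pvGo m a mid = pvOptRes m (PySem.List.pyRange a (mid + 1) 1) :=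
          IH a mid (by omega)
        have hi2 : pvGo m (mid + 1) b = pvOptRes m (PySem.List.pyRange (mid + 1) (b + 1) 1) :=
          IH (mid + 1) b (by omega)
        have hsplit : PySem.List.pyRange a (b + 1) 1 =
            PySem.List.pyRange a (mid + 1) 1 ++ PySem.List.pyRange (mid + 1) (b + 1) 1 :=
          PySem.List.pyRange_one_append a (mid + 1) (b + 1) (by omega) (by omega)
        rw [hi1, hi2, hsplit, pv_optRes_append]

-- ---- the long branch: the shift loop reaches exactly bitLength (L ^ R) ----
theorem pv_shift_loop (L R : Int) (h : Nat)
    (hstop : L >>> h = R >>> h) (hgo : ∀ k, k < h → L >>> k ≠ R >>> k) :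
    ∀ (j k fuel : Nat), k + j = h → j < fuel →
      pvShiftA fuel (L >>> k) (R >>> k) k = (L >>> h, h) := by
  intro j
  induction j with
  | zero =>
    intro k fuel hk hf
    have hk' : k = h := by omega
    subst hk'
    cases fuel with
    | zero => omega
    | succ f => simp [pvShiftA, hstop]
  | succ j IH =>
    intro k fuel hk hf
    have hklt : k < h := by omega
    cases fuel with
    | zero => omega
    | succ f =>
      have hne : L >>> k ≠ R >>> k := hgo k hklt
      have hs : ∀ z : Int, (z >>> k) >>> (1 : Nat) = z >>> (k + 1) := by
        intro z; rw [← Int.shiftRight_add]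
      simp only [pvShiftA, if_pos hne, hs]
      exact IH (k + 1) f (by omega) (by omega)

theorem pv_big_eq (L R : Int) (hlt : L < R) (hsign : 0 ≤ L ∨ R < 0)
    (hL : -2147483648 ≤ L) (hR : R ≤ 2147483648) :
    pvShiftA 128 L R 0 =
      (L >>> PySem.Int.bitLength (PySem.Int.bxor L R), PySem.Int.bitLength (PySem.Int.bxor L R)) := by
  set X := PySem.Int.bxor L R with hXdef
  have hXxor : X = Int.xor L R := pv_bxor_eq_xor L R
  have hX0 : 0 ≤ X := by
    rcases hsign with hs | hs
    · have hR0 : (0 : Int) ≤ R := by omega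
      rw [hXdef, PySem.Int.bxor_of_nonneg hs hR0]
      positivity
    · have hL0 : ¬ (0 : Int) ≤ L := by omega
      have hR0 : ¬ (0 : Int) ≤ R := by omega
      simp only [hXdef, PySem.Int.bxor, if_neg hL0, if_neg hR0]
      positivity
  have hXne : X ≠ 0 := by
    intro h0
    rw [hXxor] at h0
    exact absurd (pv_xor_eq_zero h0) (by omega)
  have hXlt : X < 2 ^ 32 := by
    rcases hsign with hs | hs
    · have hR0 : (0 : Int) ≤ R := by omega
      rw [hXdef, PySem.Int.bxor_of_nonneg hs hR0]
      have h1 : L.toNat < 2 ^ 32 := by omega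
      have h2 : R.toNat < 2 ^ 32 := by omega
      have := Nat.xor_lt_two_pow h1 h2
      push_cast; omega
    · have hL0 : ¬ (0 : Int) ≤ L := by omega
      have hR0 : ¬ (0 : Int) ≤ R := by omega
      simp only [hXdef, PySem.Int.bxor, if_neg hL0, if_neg hR0]
      have h1 : (-L - 1).toNat < 2 ^ 32 := by omega
      have h2 : (-R - 1).toNat < 2 ^ 32 := by omega
      have := Nat.xor_lt_two_pow h1 h2
      push_cast; omega
  set h := PySem.Int.bitLength X with hh
  have habs : (X.natAbs : Int) = X := Int.natAbs_of_nonneg hX0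
  have hub : X.natAbs < 2 ^ h := PySem.Int.lt_two_pow_bitLength X
  have hlb : 2 ^ (h - 1) ≤ X.natAbs := PySem.Int.two_pow_bitLength_le X hXne
  have hh32 : h ≤ 32 := by
    by_contra hc
    push Not at hc
    have : (2 : Nat) ^ 32 ≤ 2 ^ (h - 1) := Nat.pow_le_pow_right (by omega) (by omega)
    have : (2 : Nat) ^ 32 ≤ X.natAbs := le_trans this hlb
    have : ((2 : Nat) ^ 32 : Int) ≤ X := by omega
    push_cast at this; omega
  have hstop : L >>> h = R >>> h := by
    rw [pv_shiftRight_eq_iff, ← hXxor, pv_shiftRight_eq_zero_iff hX0]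
    calc X = (X.natAbs : Int) := habs.symm
    _ < ((2 ^ h : Nat) : Int) := by exact_mod_cast hub
    _ = 2 ^ h := by push_cast; ring
  have hgo : ∀ k, k < h → L >>> k ≠ R >>> k := by
    intro k hk hcon
    rw [pv_shiftRight_eq_iff, ← hXxor, pv_shiftRight_eq_zero_iff hX0] at hcon
    have h1 : (2 : Nat) ^ k ≤ 2 ^ (h - 1) := Nat.pow_le_pow_right (by omega) (by omega)
    have h2 : (2 : Nat) ^ k ≤ X.natAbs := le_trans h1 hlb
    have h3 : ((2 : Nat) ^ k : Int) ≤ X := by omega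
    push_cast at h3
    omega
  have := pv_shift_loop L R h hstop hgo h 0 128 (by omega) (by omega)
  simpa [Int.shiftRight_zero] using this

-- ===== VERDICT (by name: the statement is the Claim_ definition above) =====
theorem sol_003_spec : Claim_equal_sol_003 := by
  unfold Claim_equal_sol_003
  intro L R m hDom hPre
  unfold Spec_sol_003 sol_003 sol_003_alt
  by_cases hsmall : R - L ≤ 2000000
  · simp only [if_pos hsmall]
    rw [pv_go_eq m (R - L + 1).toNat L R (by omega), pv_foldA]
    cases h : pvOptRes m (PySem.List.pyRange L (R + 1) 1) with
    | none => simp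
    | some v => simp
  · simp only [if_neg hsmall]
    have hDom' : -2147483648 ≤ L ∧ R ≤ 2147483648 := by
      unfold Dom_sol_003 pvDomInt at hDom
      simp only [Bool.and_eq_true, decide_eq_true_eq] at hDom
      omega
    rw [pv_big_eq L R (by omega) (hPre.2 (by omega)) hDom'.1 hDom'.2]

-- pvWitness sanity: Dom and Pre hold at the witness
theorem pv_witness_ok :
    Dom_sol_003 pvWitness_sol_003.1 pvWitness_sol_003.2.1 pvWitness_sol_003.2.2 ∧
    Pre_sol_003 pvWitness_sol_003.1 pvWitness_sol_003.2.1 pvWitness_sol_003.2.2 := by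
  constructor <;> decide
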